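-- pv_equiv track=rewrite | github.com/Bushraven/Elite-Dangerous-AI-Integration | StatusParser.py | translate_flags2
-- ===== SOURCE A (Python) =====
-- def translate_flags2(flags2_value):
--     """Translates Flags2 integer to a dictionary of only True flags."""
--     all_flags2 = {
--         "OnFoot": bool(flags2_value & 1),
--         "InTaxi": bool(flags2_value & 2),
--         "InMulticrew": bool(flags2_value & 4),
--         "OnFootInStation": bool(flags2_value & 8),
--         "OnFootOnPlanet": bool(flags2_value & 16),
--         "AimDownSight": bool(flags2_value & 32),
--         "LowOxygen": bool(flags2_value & 64),
--         "LowHealth": bool(flags2_value & 128),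
--         "Cold": bool(flags2_value & 256),
--         "Hot": bool(flags2_value & 512),
--         "VeryCold": bool(flags2_value & 1024),
--         "VeryHot": bool(flags2_value & 2048),
--         "Glide Mode": bool(flags2_value & 4096),
--         "OnFootInHangar": bool(flags2_value & 8192),
--         "OnFootSocialSpace": bool(flags2_value & 16384),
--         "OnFootExterior": bool(flags2_value & 32768),
--         "BreathableAtmosphere": bool(flags2_value & 65536),
--         "Telepresence Multicrew": bool(flags2_value & 131072),
--         "Physical Multicrew": bool(flags2_value & 262144),
--         "Fsd hyperdrive charging": bool(flags2_value & 524288),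
--     }
--
--     # Return only flags that are True
--     true_flags2 = {key: value for key, value in all_flags2.items() if value}
--     return true_flags2
-- ===== SOURCE B (Python) =====
-- _FLAG2_NAMES = (
--     "OnFoot", "InTaxi", "InMulticrew", "OnFootInStation", "OnFootOnPlanet",
--     "AimDownSight", "LowOxygen", "LowHealth", "Cold", "Hot",
--     "VeryCold", "VeryHot", "Glide Mode", "OnFootInHangar", "OnFootSocialSpace",
--     "OnFootExterior", "BreathableAtmosphere", "Telepresence Multicrew",
--     "Physical Multicrew", "Fsd hyperdrive charging",
-- )
--
--
-- def translate_flags2(flags2_value):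
--     """Translates Flags2 integer to a dictionary of only True flags."""
--     true_flags2 = {}
--     bits = flags2_value & 0xFFFFF  # only the 20 defined flag bits
--     for name in _FLAG2_NAMES:
--         if not bits:
--             break  # no flag bits left: later names cannot be set
--         bits, r = divmod(bits, 2)
--         if r:
--             true_flags2[name] = True
--     return true_flags2
-- ===== Notes on version B (the rewrite author's own statement) =====
-- stated objective: alternative
-- what changed: Instead of building the full dict of per-flag masked tests and filtering it, B consumes the masked integer itself by repeated halving with divmod, walking the ordered name tuple and stopping early once no set bits remain; no per-flag masks and no build-then-filter pass.
import Mathlib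
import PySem

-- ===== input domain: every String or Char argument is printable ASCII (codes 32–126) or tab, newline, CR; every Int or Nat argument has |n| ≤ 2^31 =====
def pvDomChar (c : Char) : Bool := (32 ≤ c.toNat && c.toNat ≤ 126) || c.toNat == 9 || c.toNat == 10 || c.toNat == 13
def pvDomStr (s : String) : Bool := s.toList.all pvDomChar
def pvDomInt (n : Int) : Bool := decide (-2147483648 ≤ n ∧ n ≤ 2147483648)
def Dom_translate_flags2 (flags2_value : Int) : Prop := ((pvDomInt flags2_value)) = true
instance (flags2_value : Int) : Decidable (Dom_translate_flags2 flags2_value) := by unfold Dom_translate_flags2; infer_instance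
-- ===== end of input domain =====

-- B consumes the masked integer by repeated divmod(bits, 2) along the ordered name list with
-- early exit, instead of A's full 20-entry masked dict followed by a filtering pass (objective: alternative).

-- ===== PORT A =====
-- literal transliteration: build the full dict of all 20 flags, then keep the true ones.
def translate_flags2 (flags2_value : Int) : List (String × Bool) :=
  let all_flags2 : List (String × Bool) :=
    [ ("OnFoot", decide (PySem.Int.band flags2_value 1 ≠ 0)),
      ("InTaxi", decide (PySem.Int.band flags2_value 2 ≠ 0)),
      ("InMulticrew", decide (PySem.Int.band flags2_value 4 ≠ 0)),
      ("OnFootInStation", decide (PySem.Int.band flags2_value 8 ≠ 0)),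
      ("OnFootOnPlanet", decide (PySem.Int.band flags2_value 16 ≠ 0)),
      ("AimDownSight", decide (PySem.Int.band flags2_value 32 ≠ 0)),
      ("LowOxygen", decide (PySem.Int.band flags2_value 64 ≠ 0)),
      ("LowHealth", decide (PySem.Int.band flags2_value 128 ≠ 0)),
      ("Cold", decide (PySem.Int.band flags2_value 256 ≠ 0)),
      ("Hot", decide (PySem.Int.band flags2_value 512 ≠ 0)),
      ("VeryCold", decide (PySem.Int.band flags2_value 1024 ≠ 0)),
      ("VeryHot", decide (PySem.Int.band flags2_value 2048 ≠ 0)),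
      ("Glide Mode", decide (PySem.Int.band flags2_value 4096 ≠ 0)),
      ("OnFootInHangar", decide (PySem.Int.band flags2_value 8192 ≠ 0)),
      ("OnFootSocialSpace", decide (PySem.Int.band flags2_value 16384 ≠ 0)),
      ("OnFootExterior", decide (PySem.Int.band flags2_value 32768 ≠ 0)),
      ("BreathableAtmosphere", decide (PySem.Int.band flags2_value 65536 ≠ 0)),
      ("Telepresence Multicrew", decide (PySem.Int.band flags2_value 131072 ≠ 0)),
      ("Physical Multicrew", decide (PySem.Int.band flags2_value 262144 ≠ 0)),
      ("Fsd hyperdrive charging", decide (PySem.Int.band flags2_value 524288 ≠ 0)) ]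
  all_flags2.filter (fun kv => kv.2)

-- ===== PORT B =====
def pvFlagNames : List String :=
  [ "OnFoot", "InTaxi", "InMulticrew", "OnFootInStation", "OnFootOnPlanet",
    "AimDownSight", "LowOxygen", "LowHealth", "Cold", "Hot",
    "VeryCold", "VeryHot", "Glide Mode", "OnFootInHangar", "OnFootSocialSpace",
    "OnFootExterior", "BreathableAtmosphere", "Telepresence Multicrew",
    "Physical Multicrew", "Fsd hyperdrive charging" ]

-- Source B's `for name in _FLAG2_NAMES: if not bits: break; bits, r = divmod(bits, 2); if r: out[name] = True`.
-- All keys are distinct, so the dict insertions are plain appends in loop order.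
def pvLoop (bits : Nat) : List String → List (String × Bool)
  | [] => []
  | nm :: rest =>
    if bits = 0 then []
    else if bits % 2 = 1 then (nm, true) :: pvLoop (bits / 2) rest
    else pvLoop (bits / 2) rest

-- `flags2_value & 0xFFFFF` is always ≥ 0 in Python, so running the loop on `.toNat` is exact.
def translate_flags2_alt (flags2_value : Int) : List (String × Bool) :=
  pvLoop (PySem.Int.band flags2_value 1048575).toNat pvFlagNames

-- ===== PRECONDITION & SPEC =====
def Spec_translate_flags2 (flags2_value : Int) (out : List (String × Bool)) : Prop := out = translate_flags2_alt flags2_value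
instance (flags2_value : Int) (out : List (String × Bool)) : Decidable (Spec_translate_flags2 flags2_value out) := by unfold Spec_translate_flags2; infer_instance

-- ===== CLAIM (what is proved, stated in full; the proofs are below) =====
def Claim_equal_translate_flags2 : Prop := ∀ (flags2_value : Int), Dom_translate_flags2 flags2_value → Spec_translate_flags2 flags2_value (translate_flags2 flags2_value)

-- ===== LEMMAS AND PROOFS =====

-- proof-side table: the flag names with their literal masks, in order (A's 20 entries)
def pvMaskPairs : List (String × Int) :=
  [ ("OnFoot", 1), ("InTaxi", 2), ("InMulticrew", 4), ("OnFootInStation", 8),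
    ("OnFootOnPlanet", 16), ("AimDownSight", 32), ("LowOxygen", 64), ("LowHealth", 128),
    ("Cold", 256), ("Hot", 512), ("VeryCold", 1024), ("VeryHot", 2048),
    ("Glide Mode", 4096), ("OnFootInHangar", 8192), ("OnFootSocialSpace", 16384),
    ("OnFootExterior", 32768), ("BreathableAtmosphere", 65536),
    ("Telepresence Multicrew", 131072), ("Physical Multicrew", 262144),
    ("Fsd hyperdrive charging", 524288) ]

def pvStep (n : Int) (p : String × Int) (acc : List (String × Bool)) : List (String × Bool) :=
  if PySem.Int.band n p.2 ≠ 0 then (p.1, true) :: acc else acc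

-- names paired with masks 2^i, 2^(i+1), …
def pvPairsFrom (i : Nat) : List String → List (String × Int)
  | [] => []
  | nm :: rest => (nm, ((2 : Int) ^ i)) :: pvPairsFrom (i + 1) rest

-- A's masked tests, indexed form
def pvMaskF (m : Nat) (i : Nat) : List String → List (String × Bool)
  | [] => []
  | nm :: rest =>
    if m &&& 2 ^ i ≠ 0 then (nm, true) :: pvMaskF m (i + 1) rest
    else pvMaskF m (i + 1) rest

-- the common normal form: peel bits LSB-first along the names (pvLoop without the early exit)
def pvSpecA (m : Nat) : List String → List (String × Bool)
  | [] => []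
  | nm :: rest =>
    if m % 2 = 1 then (nm, true) :: pvSpecA (m / 2) rest
    else pvSpecA (m / 2) rest

-- A's build-then-filter over any name/mask table is the one-pass fold
theorem pv_filter_eq_foldr (n : Int) (ps : List (String × Int)) :
    (ps.map (fun p => (p.1, decide (PySem.Int.band n p.2 ≠ 0)))).filter (fun kv => kv.2)
      = ps.foldr (pvStep n) [] := by
  induction ps with
  | nil => rfl
  | cons p ps ih =>
    simp only [List.map_cons, List.filter_cons, List.foldr_cons]
    rw [ih]
    by_cases h : PySem.Int.band n p.2 ≠ 0 <;> simp [pvStep, h]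

theorem pv_pairs_eq : pvPairsFrom 0 pvFlagNames = pvMaskPairs := by
  norm_num [pvPairsFrom, pvFlagNames, pvMaskPairs]

-- subtracting the common bits is bitwise difference
theorem pv_sub_and (a : Nat) : ∀ c : Nat, a - (a &&& c) = a.ldiff c := by
  induction a using Nat.binaryRec with
  | zero => intro c; apply Nat.eq_of_testBit_eq; intro k; simp [Nat.testBit_ldiff]
  | bit b n ih =>
    intro c
    have hc : c = Nat.bit (decide (c % 2 = 1)) (c / 2) := by
      rw [Nat.bit_val]; by_cases h : c % 2 = 1 <;> simp [h] <;> omega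
    rw [hc, Nat.land_bit, Nat.ldiff_bit, Nat.bit_val, Nat.bit_val, Nat.bit_val]
    have h1 := ih (c / 2)
    have h2 : n &&& c / 2 ≤ n := Nat.and_le_left
    cases b <;> by_cases h : c % 2 = 1 <;> simp [h] <;> omega

theorem pv_absorb (i : Nat) (hi : i < 20) : 1048575 &&& 2 ^ i = 2 ^ i := by
  have h : (1048575 : Nat) = 2 ^ 20 - 1 := by norm_num
  rw [h]
  apply Nat.eq_of_testBit_eq
  intro k
  simp only [Nat.testBit_and, Nat.testBit_two_pow_sub_one, Nat.testBit_two_pow]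
  by_cases hik : i = k
  · subst hik; simp [hi]
  · simp [hik]

-- masking with 0xFFFFF first does not change any of the 20 tested bits
theorem pv_bandK (n : Int) (i : Nat) (hi : i < 20) :
    PySem.Int.band n ((2 : Int) ^ i) = (((PySem.Int.band n 1048575).toNat &&& 2 ^ i : Nat) : Int) := by
  have hp : ((2 : Int) ^ i) = ((2 ^ i : Nat) : Int) := by push_cast; ring
  rcases le_or_gt 0 n with hn | hn
  · rw [PySem.Int.band_of_nonneg hn (by positivity),
        PySem.Int.band_of_nonneg hn (by norm_num)]
    have ht : ((2 : Int) ^ i).toNat = 2 ^ i := by rw [hp]; exact Int.toNat_natCast _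
    have ht2 : ((1048575 : Int)).toNat = 1048575 := rfl
    rw [ht, ht2, Int.toNat_natCast, Nat.and_assoc, pv_absorb i hi]
  · have hn' : ¬ (0 : Int) ≤ n := not_le.mpr hn
    simp only [PySem.Int.band, hn', if_false, if_pos (by positivity : (0:Int) ≤ (2:Int)^i),
      if_pos (by norm_num : (0:Int) ≤ (1048575:Int))]
    have ht : ((2 : Int) ^ i).toNat = 2 ^ i := by rw [hp]; exact Int.toNat_natCast _
    have ht2 : ((1048575 : Int)).toNat = 1048575 := rfl
    rw [ht, ht2, Int.toNat_natCast]
    congr 1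
    set c := (-n - 1).toNat with hcdef
    rw [pv_sub_and, pv_sub_and]
    have h20 : (1048575 : Nat) = 2 ^ 20 - 1 := by norm_num
    rw [h20]
    apply Nat.eq_of_testBit_eq
    intro k
    simp only [Nat.testBit_ldiff, Nat.testBit_and, Nat.testBit_two_pow,
      Nat.testBit_two_pow_sub_one]
    by_cases hik : i = k
    · subst hik; simp [hi]
    · simp [hik]

-- the masked value is a 20-bit number
theorem pv_m_le (n : Int) : (PySem.Int.band n 1048575).toNat ≤ 1048575 := by
  simp only [PySem.Int.band]
  split_ifs with h1 h2
  · rw [Int.toNat_natCast]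
    exact Nat.and_le_right
  · rw [Int.toNat_natCast]; omega
  · rw [Int.toNat_natCast]; omega
  · omega

-- A's fold over the mask table is the indexed masked-test recursion on m
theorem pv_foldr_eq_maskF (n : Int) (names : List String) :
    ∀ i : Nat, i + names.length ≤ 20 →
      (pvPairsFrom i names).foldr (pvStep n) []
        = pvMaskF (PySem.Int.band n 1048575).toNat i names := by
  induction names with
  | nil => intro i _; rfl
  | cons nm rest ih =>
    intro i hle
    have hi : i < 20 := by simp only [List.length_cons] at hle; omega
    have hcond : (PySem.Int.band n ((2 : Int) ^ i) ≠ 0)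
        ↔ ((PySem.Int.band n 1048575).toNat &&& 2 ^ i ≠ 0) := by
      rw [pv_bandK n i hi]
      exact_mod_cast Int.natCast_ne_zero
    simp only [pvPairsFrom, List.foldr_cons, pvStep, pvMaskF]
    by_cases h : (PySem.Int.band n 1048575).toNat &&& 2 ^ i ≠ 0
    · rw [if_pos (hcond.mpr h), if_pos h, ih (i + 1) (by simp only [List.length_cons] at hle ⊢; omega)]
    · rw [if_neg (fun hx => h (hcond.mp hx)), if_neg h, ih (i + 1) (by simp only [List.length_cons] at hle ⊢; omega)]

-- testing bit i of m is testing the LSB of m >>> i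
theorem pv_maskF_eq (m : Nat) : ∀ (names : List String) (i : Nat),
    pvMaskF m i names = pvSpecA (m >>> i) names := by
  intro names
  induction names with
  | nil => intro i; rfl
  | cons nm rest ih =>
    intro i
    have hbit : m.testBit i = decide ((m >>> i) % 2 = 1) := by simp [Nat.testBit]
    have hcond : (m &&& 2 ^ i ≠ 0) ↔ ((m >>> i) % 2 = 1) := by
      have h2 : m &&& 2 ^ i = (if (m >>> i) % 2 = 1 then 1 else 0) * 2 ^ i := by
        rw [Nat.and_two_pow, hbit]; by_cases h : (m >>> i) % 2 = 1 <;> simp [h]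
      rw [h2]
      by_cases h : (m >>> i) % 2 = 1
      · simp [h, Nat.pow_eq_zero]
      · simp [h]
    have hdiv : m >>> (i + 1) = (m >>> i) / 2 := Nat.shiftRight_succ m i
    simp only [pvMaskF, pvSpecA]
    by_cases h : (m >>> i) % 2 = 1
    · rw [if_pos (hcond.mpr h), if_pos h, ih (i + 1), hdiv]
    · rw [if_neg (fun hx => h (hcond.mp hx)), if_neg h, ih (i + 1), hdiv]

theorem pv_specA_zero : ∀ names : List String, pvSpecA 0 names = [] := by
  intro names
  induction names with
  | nil => rfl
  | cons nm rest ih => simp [pvSpecA, ih]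

-- the early exit is sound: once bits = 0 nothing more is emitted
theorem pv_loop_eq : ∀ (names : List String) (m : Nat), m < 2 ^ names.length →
    pvLoop m names = pvSpecA m names := by
  intro names
  induction names with
  | nil => intro m hm; simp at hm; subst hm; rfl
  | cons nm rest ih =>
    intro m hm
    by_cases h0 : m = 0
    · subst h0; simp [pvLoop, pv_specA_zero, pvSpecA]
    · have hlt : m / 2 < 2 ^ rest.length := by
        simp only [List.length_cons, pow_succ] at hm; omega
      simp only [pvLoop, if_neg h0, pvSpecA, ih (m / 2) hlt]

-- ===== VERDICT (by name: the statement is the Claim_ definition above) =====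
theorem translate_flags2_spec : Claim_equal_translate_flags2 := by
  intro n _
  unfold Spec_translate_flags2
  have hA : translate_flags2 n
      = (pvMaskPairs.map (fun p => (p.1, decide (PySem.Int.band n p.2 ≠ 0)))).filter
          (fun kv => kv.2) := by
    simp [translate_flags2, pvMaskPairs]
  rw [hA, pv_filter_eq_foldr, ← pv_pairs_eq,
    pv_foldr_eq_maskF n pvFlagNames 0 (by simp [pvFlagNames]),
    pv_maskF_eq, Nat.shiftRight_zero]
  unfold translate_flags2_alt
  rw [pv_loop_eq]
  have := pv_m_le n
  simp only [pvFlagNames, List.length_cons, List.length_nil]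
  omega
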